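-- pv_equiv track=rewrite | github.com/kugurst/leviathans-breath | gui/editable_curve.py | search
-- ===== SOURCE A (Python) =====
-- import math
--
-- def search(arr, x):
--     if x < arr[0][0]:
--         return arr[0], arr[0]
--     if x > arr[-1][0]:
--         return arr[-1], arr[-1]
--
--     lo = 0
--     hi = len(arr) - 1
--
--     while lo <= hi:
--         mid = math.floor((hi + lo) / 2)
--
--         if x < arr[mid][0]:
--             hi = mid - 1
--         elif x > arr[mid][0]:
--             lo = mid + 1
--         else:
--             return arr[mid], arr[mid]
--
--     return arr[hi], arr[lo]
-- ===== SOURCE B (Python) =====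
-- def search(arr, x):
--     first, last = arr[0], arr[-1]
--     if x < first[0]:
--         return first, first
--     if x > last[0]:
--         return last, last
--
--     def go(seg, left, right):
--         if not seg:
--             return left, right
--         m = (len(seg) - 1) // 2
--         e = seg[m]
--         if e[0] == x:
--             return e, e
--         if x < e[0]:
--             return go(seg[:m], left, e)
--         return go(seg[m + 1:], e, right)
--
--     return go(arr, first, last)
-- ===== Notes on version B (the rewrite author's own statement) =====
-- stated objective: alternative
-- what changed: A's iterative binary search over mutable integer bounds (lo, hi) with global-index lookups is replaced by structural recursion on the sub-segment list itself (slicing at its midpoint), carrying the two neighbouring elements as bracket accumulators instead of re-indexing the array at the end.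
import Mathlib
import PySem

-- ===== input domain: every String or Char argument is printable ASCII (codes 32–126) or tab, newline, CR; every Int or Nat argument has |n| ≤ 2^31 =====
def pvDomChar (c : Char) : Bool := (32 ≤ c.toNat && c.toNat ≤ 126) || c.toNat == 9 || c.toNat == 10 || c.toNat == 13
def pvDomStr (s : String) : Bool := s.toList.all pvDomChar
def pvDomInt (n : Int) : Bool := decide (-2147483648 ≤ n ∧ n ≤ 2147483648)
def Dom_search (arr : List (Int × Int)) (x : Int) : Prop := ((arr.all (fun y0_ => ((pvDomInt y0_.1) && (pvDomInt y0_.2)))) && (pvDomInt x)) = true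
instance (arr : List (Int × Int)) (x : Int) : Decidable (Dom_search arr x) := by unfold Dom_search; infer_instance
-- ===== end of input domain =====

-- B replaces A's index-pair while loop by structural recursion on the sub-SEGMENT itself,
-- carrying the two neighbouring elements as the bracket accumulators; equal on all non-empty inputs.

-- ===== PORT A =====
-- A's while loop over the state (lo, hi); math.floor((hi+lo)/2) = (hi+lo)//2 exactly,
-- since lo,hi ≥ 0 here and hi+lo is far below 2^53 (float division exact).
def searchLoop (arr : List (Int × Int)) (x : Int) (lo hi : Int) :
    (Int × Int) × (Int × Int) :=
  if _h : lo ≤ hi then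
    let mid := PySem.Int.floordiv (hi + lo) 2
    let amid := (PySem.List.pyGet? arr mid).getD (0, 0)
    if x < amid.1 then searchLoop arr x lo (mid - 1)
    else if x > amid.1 then searchLoop arr x (mid + 1) hi
    else (amid, amid)
  else ((PySem.List.pyGet? arr hi).getD (0, 0), (PySem.List.pyGet? arr lo).getD (0, 0))
termination_by (hi + 1 - lo).toNat
decreasing_by
  all_goals
    have hc : PySem.Int.floordiv (hi + lo) 2 = PySem.Int.floordiv (lo + hi) 2 := by
      rw [Int.add_comm]
    have := PySem.Int.floordiv_two_mid_bounds (lo := lo) (hi := hi) _h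
    omega

def search (arr : List (Int × Int)) (x : Int) : (Int × Int) × (Int × Int) :=
  let first := (PySem.List.pyGet? arr 0).getD (0, 0)
  let last := (PySem.List.pyGet? arr (-1)).getD (0, 0)
  if x < first.1 then (first, first)
  else if x > last.1 then (last, last)
  else searchLoop arr x 0 ((arr.length : Int) - 1)

-- ===== PORT B =====
-- B's recursion on the segment list; m = (len(seg)-1)//2 is a Nat so '//' is Nat division,
-- and m < seg.length always, so plain getD is exact for Python's seg[m];
-- seg[:m] = seg.take m and seg[m+1:] = seg.drop (m+1) for these non-negative in-range bounds.
def goB (x : Int) : List (Int × Int) → (Int × Int) → (Int × Int) → (Int × Int) × (Int × Int)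
  | [], left, right => (left, right)
  | a :: s, left, right =>
    let m := ((a :: s).length - 1) / 2
    let e := (a :: s).getD m (0, 0)
    if e.1 = x then (e, e)
    else if x < e.1 then goB x ((a :: s).take m) left e
    else goB x ((a :: s).drop (m + 1)) e right
termination_by seg => seg.length
decreasing_by
  · simp only [List.length_take]; simp; omega
  · simp only [List.length_drop]; simp

def search_alt (arr : List (Int × Int)) (x : Int) : (Int × Int) × (Int × Int) :=
  let first := (PySem.List.pyGet? arr 0).getD (0, 0)
  let last := (PySem.List.pyGet? arr (-1)).getD (0, 0)
  if x < first.1 then (first, first)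
  else if x > last.1 then (last, last)
  else goB x arr first last

-- ===== PRECONDITION & SPEC =====
-- Pre_ excludes exactly the empty list, where A raises IndexError on arr[0].
def Pre_search (arr : List (Int × Int)) (x : Int) : Prop := arr ≠ []
instance (arr : List (Int × Int)) (x : Int) : Decidable (Pre_search arr x) := by
  unfold Pre_search; infer_instance
def pvWitness_search : (List (Int × Int)) × Int := ([(1, 2), (3, 4)], 2)

def Spec_search (arr : List (Int × Int)) (x : Int) (out : (Int × Int) × (Int × Int)) : Prop := out = search_alt arr x
instance (arr : List (Int × Int)) (x : Int) (out : (Int × Int) × (Int × Int)) : Decidable (Spec_search arr x out) := by unfold Spec_search; infer_instance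

-- ===== CLAIM (what is proved, stated in full; the proofs are below) =====
def Claim_equal_search : Prop := ∀ (arr : List (Int × Int)) (x : Int), Dom_search arr x → Pre_search arr x → Spec_search arr x (search arr x)

-- ===== LEMMAS AND PROOFS =====

-- goB unfolded one step on a non-empty segment.
theorem goB_nonempty (x : Int) (seg : List (Int × Int)) (hne : seg ≠ []) (l r : Int × Int) :
    goB x seg l r =
      (if (seg.getD ((seg.length - 1) / 2) (0, 0)).1 = x then
        (seg.getD ((seg.length - 1) / 2) (0, 0), seg.getD ((seg.length - 1) / 2) (0, 0))
      else if x < (seg.getD ((seg.length - 1) / 2) (0, 0)).1 then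
        goB x (seg.take ((seg.length - 1) / 2)) l (seg.getD ((seg.length - 1) / 2) (0, 0))
      else
        goB x (seg.drop ((seg.length - 1) / 2 + 1)) (seg.getD ((seg.length - 1) / 2) (0, 0)) r) := by
  cases seg with
  | nil => exact absurd rfl hne
  | cons a s => rw [goB]

-- arr[len-1] is arr[-1] on a non-empty list.
theorem pyGet_last (xs : List (Int × Int)) (h : xs ≠ []) :
    PySem.List.pyGet? xs ((xs.length : Int) - 1) = PySem.List.pyGet? xs (-1) := by
  have hp : 0 < xs.length := List.length_pos_iff.mpr h
  rw [PySem.List.pyGet?_neg_one, List.getLast?_eq_getElem?,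
    show ((xs.length : Int) - 1) = ((xs.length - 1 : Nat) : Int) by omega,
    PySem.List.pyGet?_natCast]

-- Invariant: the loop state (lo, hi) corresponds to the segment arr[lo:hi+1] with its
-- two neighbours as the bracket accumulators of goB (the boundary guards hx0/hxn keep
-- the placeholder accumulators first/last from ever being returned wrongly).
theorem loop_eq_go (arr : List (Int × Int)) (x : Int)
    (hx0 : ¬ x < ((PySem.List.pyGet? arr 0).getD (0, 0)).1)
    (hxn : ¬ x > ((PySem.List.pyGet? arr (-1)).getD (0, 0)).1)
    (lo hi : Int) (h0 : 0 ≤ lo) (h1 : lo ≤ hi + 1) (h2 : hi ≤ (arr.length : Int) - 1)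
    (v1 : 1 ≤ lo ∨ 0 ≤ hi) (v2 : hi ≤ (arr.length : Int) - 2 ∨ lo ≤ (arr.length : Int) - 1) :
    searchLoop arr x lo hi =
      goB x ((arr.drop lo.toNat).take (hi + 1 - lo).toNat)
        (if lo = 0 then (PySem.List.pyGet? arr 0).getD (0, 0)
         else (PySem.List.pyGet? arr (lo - 1)).getD (0, 0))
        (if hi = (arr.length : Int) - 1 then (PySem.List.pyGet? arr (-1)).getD (0, 0)
         else (PySem.List.pyGet? arr (hi + 1)).getD (0, 0)) := by
  fun_induction searchLoop arr x lo hi with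
  | case1 lo hi h mid amid hlt ih =>
    have hediv : mid = (hi + lo) / 2 := by
      show PySem.Int.floordiv (hi + lo) 2 = _
      rw [PySem.Int.floordiv_eq_ediv_of_pos (by norm_num)]
    have hamid : amid = (PySem.List.pyGet? arr mid).getD (0, 0) := rfl
    clear_value mid amid
    set seg := (arr.drop lo.toNat).take (hi + 1 - lo).toNat with hsegd
    set M := ((hi + 1 - lo).toNat - 1) / 2 with hMd
    clear_value seg M
    have hlen : seg.length = (hi + 1 - lo).toNat := by
      rw [hsegd]; simp [List.length_take, List.length_drop]; omega
    have hne : seg ≠ [] := by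
      intro hnil; rw [hnil] at hlen; simp at hlen; omega
    have hMl : (seg.length - 1) / 2 = M := by rw [hlen, hMd]
    have he : seg.getD M (0, 0) = amid := by
      rw [List.getD_eq_getElem?_getD, hsegd,
        List.getElem?_take_of_lt (by omega : M < (hi + 1 - lo).toNat),
        List.getElem?_drop, hamid,
        show mid = ((lo.toNat + M : Nat) : Int) by omega, PySem.List.pyGet?_natCast]
    rw [goB_nonempty x seg hne, hMl, he,
      if_neg (show ¬ amid.1 = x by omega), if_pos hlt]
    have v1' : 1 ≤ lo ∨ 0 ≤ mid - 1 := by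
      by_cases hl1 : 1 ≤ lo
      · exact Or.inl hl1
      · right
        by_contra hc
        have hfa : amid = (PySem.List.pyGet? arr 0).getD (0, 0) := by
          rw [hamid, show mid = 0 by omega]
        exact hx0 (hfa ▸ hlt)
    rw [ih h0 (by omega) (by omega) v1' (Or.inl (by omega))]
    rw [if_neg (show ¬ mid - 1 = (arr.length : Int) - 1 by omega),
      show mid - 1 + 1 = mid by omega]
    have hseg' : List.take (mid - lo).toNat (List.drop lo.toNat arr) = seg.take M := by
      rw [hsegd, List.take_take]; congr 1; omega
    rw [hseg', ← hamid]
  | case2 lo hi h mid amid hnlt hgt ih =>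
    have hediv : mid = (hi + lo) / 2 := by
      show PySem.Int.floordiv (hi + lo) 2 = _
      rw [PySem.Int.floordiv_eq_ediv_of_pos (by norm_num)]
    have hamid : amid = (PySem.List.pyGet? arr mid).getD (0, 0) := rfl
    clear_value mid amid
    set seg := (arr.drop lo.toNat).take (hi + 1 - lo).toNat with hsegd
    set M := ((hi + 1 - lo).toNat - 1) / 2 with hMd
    clear_value seg M
    have hlen : seg.length = (hi + 1 - lo).toNat := by
      rw [hsegd]; simp [List.length_take, List.length_drop]; omega
    have hne : seg ≠ [] := by
      intro hnil; rw [hnil] at hlen; simp at hlen; omega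
    have hMl : (seg.length - 1) / 2 = M := by rw [hlen, hMd]
    have he : seg.getD M (0, 0) = amid := by
      rw [List.getD_eq_getElem?_getD, hsegd,
        List.getElem?_take_of_lt (by omega : M < (hi + 1 - lo).toNat),
        List.getElem?_drop, hamid,
        show mid = ((lo.toNat + M : Nat) : Int) by omega, PySem.List.pyGet?_natCast]
    rw [goB_nonempty x seg hne, hMl, he,
      if_neg (show ¬ amid.1 = x by omega), if_neg hnlt]
    have hmle : mid ≤ (arr.length : Int) - 2 := by
      by_contra hc
      have hla : amid = (PySem.List.pyGet? arr (-1)).getD (0, 0) := by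
        rw [hamid, show mid = (arr.length : Int) - 1 by omega,
          pyGet_last arr (by intro hnil; rw [hnil] at h2; simp at h2; omega)]
      exact hxn (hla ▸ hgt)
    rw [ih (by omega) (by omega) h2 (Or.inl (by omega)) (Or.inr (by omega))]
    rw [if_neg (show ¬ mid + 1 = 0 by omega), show mid + 1 - 1 = mid by omega]
    have hseg' : List.take (hi + 1 - (mid + 1)).toNat (List.drop (mid + 1).toNat arr) = seg.drop (M + 1) := by
      rw [hsegd, List.drop_take, List.drop_drop]
      congr 1
      · omega
      · congr 1; omega
    rw [hseg', ← hamid]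
  | case3 lo hi h mid amid hnlt hngt =>
    have hediv : mid = (hi + lo) / 2 := by
      show PySem.Int.floordiv (hi + lo) 2 = _
      rw [PySem.Int.floordiv_eq_ediv_of_pos (by norm_num)]
    have hamid : amid = (PySem.List.pyGet? arr mid).getD (0, 0) := rfl
    clear_value mid amid
    set seg := (arr.drop lo.toNat).take (hi + 1 - lo).toNat with hsegd
    set M := ((hi + 1 - lo).toNat - 1) / 2 with hMd
    clear_value seg M
    have hlen : seg.length = (hi + 1 - lo).toNat := by
      rw [hsegd]; simp [List.length_take, List.length_drop]; omega
    have hne : seg ≠ [] := by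
      intro hnil; rw [hnil] at hlen; simp at hlen; omega
    have hMl : (seg.length - 1) / 2 = M := by rw [hlen, hMd]
    have he : seg.getD M (0, 0) = amid := by
      rw [List.getD_eq_getElem?_getD, hsegd,
        List.getElem?_take_of_lt (by omega : M < (hi + 1 - lo).toNat),
        List.getElem?_drop, hamid,
        show mid = ((lo.toNat + M : Nat) : Int) by omega, PySem.List.pyGet?_natCast]
    rw [goB_nonempty x seg hne, hMl, he, if_pos (show amid.1 = x by omega)]
  | case4 lo hi h =>
    have hlo1 : 1 ≤ lo := by omega
    have hhi : hi ≤ (arr.length : Int) - 2 := by omega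
    rw [show (hi + 1 - lo).toNat = 0 by omega, List.take_zero]
    show ((PySem.List.pyGet? arr hi).getD (0, 0), (PySem.List.pyGet? arr lo).getD (0, 0)) = _
    rw [goB, if_neg (by omega : ¬ lo = 0), if_neg (by omega : ¬ hi = (arr.length : Int) - 1),
      show lo - 1 = hi by omega, show hi + 1 = lo by omega]
-- ===== VERDICT (by name: the statement is the Claim_ definition above) =====
theorem search_spec : Claim_equal_search := by
  intro arr x _hdom hpre
  unfold Spec_search search search_alt
  simp only []
  split_ifs with h1 h2
  · rfl
  · rfl
  · have hn : 1 ≤ arr.length := by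
      cases arr with
      | nil => exact absurd rfl hpre
      | cons a s => simp
    have := loop_eq_go arr x h1 h2 0 ((arr.length : Int) - 1)
      (by omega) (by omega) (by omega) (by omega) (by omega)
    rw [this]
    simp
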